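-- pv_equiv track=rewrite | github.com/whyseehell/open_edm | select_securities.py | select_by_pfd_country_issue
-- ===== SOURCE A (Python) =====
-- def select_by_pfd_country_issue(results,country_exch_order):
-- 	deleted = []
-- 	left = []
--
-- 	country_issue_order = {'GB':1,'DE':2,'CH':3,'AT':4,'IT':5,'US':0}
-- 	default_rank = 123456789
--
-- 	pfd_country_issue_rank = min([country_issue_order.get(hit.get('CNTRY_ISSUE_ISO'),default_rank) for hit in results ])
-- 	pfd_country_issue_hits = [hit for hit in results if
-- 									country_issue_order.get(hit.get('CNTRY_ISSUE_ISO'),default_rank) == pfd_country_issue_rank]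
--
-- 	if pfd_country_issue_hits:
-- 		left = pfd_country_issue_hits
-- 	else:
-- 		left = results
--
-- 	return deleted, left
-- ===== SOURCE B (Python) =====
-- def select_by_pfd_country_issue(results, country_exch_order):
--     # One pass: track the best rank seen so far and the list of hits attaining it,
--     # resetting the list whenever a strictly better rank appears.
--     country_issue_order = {'GB': 1, 'DE': 2, 'CH': 3, 'AT': 4, 'IT': 5, 'US': 0}
--     default_rank = 123456789
--     best = None
--     left = []
--     for hit in results:
--         r = country_issue_order.get(hit.get('CNTRY_ISSUE_ISO'), default_rank)
--         if best is None or r < best: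
--             best = r
--             left = [hit]
--         elif r == best:
--             left.append(hit)
--     return [], left
-- ===== Notes on version B (the rewrite author's own statement) =====
-- stated objective: alternative
-- what changed: Replaces A's two scans (build a rank list, take min([...]), then re-scan results filtering by that rank) with a single pass that tracks the best rank seen so far and the running list of hits attaining it, resetting the list when a strictly better rank appears.
import Mathlib
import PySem

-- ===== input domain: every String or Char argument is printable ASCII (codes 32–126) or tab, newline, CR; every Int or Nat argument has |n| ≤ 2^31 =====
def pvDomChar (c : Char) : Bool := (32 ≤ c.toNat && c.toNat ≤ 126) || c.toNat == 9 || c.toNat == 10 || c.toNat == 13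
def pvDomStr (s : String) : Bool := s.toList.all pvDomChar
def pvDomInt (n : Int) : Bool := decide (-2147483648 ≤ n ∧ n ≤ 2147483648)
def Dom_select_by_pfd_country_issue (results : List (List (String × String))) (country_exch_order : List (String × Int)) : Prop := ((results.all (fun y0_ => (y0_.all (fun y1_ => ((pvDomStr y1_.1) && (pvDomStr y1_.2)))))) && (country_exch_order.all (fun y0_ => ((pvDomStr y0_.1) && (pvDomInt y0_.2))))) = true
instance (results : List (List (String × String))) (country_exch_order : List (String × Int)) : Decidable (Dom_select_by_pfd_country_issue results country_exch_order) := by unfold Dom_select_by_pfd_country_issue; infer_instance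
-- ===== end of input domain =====

-- B replaces A's min-then-filter double scan with a single pass keeping the best rank and its hits (objective: alternative one-pass decomposition; same asymptotic cost).


-- ===== PORT A =====
-- shared helper: country_issue_order.get(hit.get('CNTRY_ISSUE_ISO'), default_rank)
-- (hit.get returns None for a missing key; dict.get with a None key falls to the default)
def pvRank (hit : List (String × String)) : Int :=
  match (hit.find? (fun p => p.1 == "CNTRY_ISSUE_ISO")).map (·.2) with
  | none => 123456789
  | some c =>
    if c = "GB" then 1 else if c = "DE" then 2 else if c = "CH" then 3
    else if c = "AT" then 4 else if c = "IT" then 5 else if c = "US" then 0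
    else 123456789

def select_by_pfd_country_issue (results : List (List (String × String))) (country_exch_order : List (String × Int)) : (List (List (String × String))) × (List (List (String × String))) :=
  let deleted : List (List (String × String)) := []
  match PySem.List.min? (results.map pvRank) (fun x => x) with
  | none => (deleted, [])   -- min([]) raises ValueError; excluded by Pre_
  | some pfd_country_issue_rank =>
    let pfd_country_issue_hits := results.filter (fun hit => decide (pvRank hit = pfd_country_issue_rank))
    let left := if pfd_country_issue_hits.isEmpty then results else pfd_country_issue_hits
    (deleted, left)

-- ===== PORT B =====
def pvStep (st : Option Int × List (List (String × String))) (hit : List (String × String)) : Option Int × List (List (String × String)) :=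
  let r := pvRank hit
  match st.1 with
  | none => (some r, [hit])
  | some best =>
    if r < best then (some r, [hit])
    else if r = best then (some best, st.2 ++ [hit])
    else st

def select_by_pfd_country_issue_alt (results : List (List (String × String))) (country_exch_order : List (String × Int)) : (List (List (String × String))) × (List (List (String × String))) :=
  let st := results.foldl pvStep (none, [])
  ([], st.2)

-- ===== PRECONDITION & SPEC =====
-- Pre_ excludes the empty results list, on which A raises ValueError (min of an empty sequence).
def Pre_select_by_pfd_country_issue (results : List (List (String × String))) (country_exch_order : List (String × Int)) : Prop := results ≠ []
instance (results : List (List (String × String))) (country_exch_order : List (String × Int)) : Decidable (Pre_select_by_pfd_country_issue results country_exch_order) := by unfold Pre_select_by_pfd_country_issue; infer_instance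

def pvWitness_select_by_pfd_country_issue : (List (List (String × String))) × (List (String × Int)) := ([[("CNTRY_ISSUE_ISO", "GB")], [("CNTRY_ISSUE_ISO", "US")]], [("X", 1)])

def Spec_select_by_pfd_country_issue (results : List (List (String × String))) (country_exch_order : List (String × Int)) (out : (List (List (String × String))) × (List (List (String × String)))) : Prop := out = select_by_pfd_country_issue_alt results country_exch_order
instance (results : List (List (String × String))) (country_exch_order : List (String × Int)) (out : (List (List (String × String))) × (List (List (String × String)))) : Decidable (Spec_select_by_pfd_country_issue results country_exch_order out) := by unfold Spec_select_by_pfd_country_issue; infer_instance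

-- ===== CLAIM (what is proved, stated in full; the proofs are below) =====
def Claim_equal_select_by_pfd_country_issue : Prop := ∀ (results : List (List (String × String))) (country_exch_order : List (String × Int)), Dom_select_by_pfd_country_issue results country_exch_order → Pre_select_by_pfd_country_issue results country_exch_order → Spec_select_by_pfd_country_issue results country_exch_order (select_by_pfd_country_issue results country_exch_order)

-- ===== LEMMAS AND PROOFS =====

-- running minimum: foldl min never exceeds its seed
lemma pv_foldl_min_le (l : List Int) : ∀ b : Int, l.foldl min b ≤ b := by
  induction l with
  | nil => intro b; simp
  | cons r t ih =>
    intro b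
    calc (r :: t).foldl min b = t.foldl min (min b r) := rfl
      _ ≤ min b r := ih _
      _ ≤ b := min_le_left _ _

-- B's fold, started from an already-seen best/acc, is the running minimum together with the filtered hits
lemma pv_fold_invariant (xs : List (List (String × String))) :
    ∀ (b : Int) (acc : List (List (String × String))),
    xs.foldl pvStep (some b, acc)
      = (some ((xs.map pvRank).foldl min b),
         (if (xs.map pvRank).foldl min b < b then [] else acc)
           ++ xs.filter (fun h => decide (pvRank h = (xs.map pvRank).foldl min b))) := by
  induction xs with
  | nil => intro b acc; simp
  | cons h t ih =>
    intro b acc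
    have hm : ((h :: t).map pvRank).foldl min b = (t.map pvRank).foldl min (min b (pvRank h)) := rfl
    by_cases hlt : pvRank h < b
    · -- strictly better rank: reset
      have hstep : pvStep (some b, acc) h = (some (pvRank h), [h]) := by
        simp [pvStep, hlt]
      have hmin : min b (pvRank h) = pvRank h := min_eq_right (le_of_lt hlt)
      have hle : (t.map pvRank).foldl min (pvRank h) ≤ pvRank h := pv_foldl_min_le _ _
      rw [List.foldl_cons, hstep, ih, hm, hmin]
      have hlt' : (t.map pvRank).foldl min (pvRank h) < b := lt_of_le_of_lt hle hlt
      simp only [if_pos hlt', List.nil_append]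
      rcases lt_or_eq_of_le hle with hlt2 | heq
      · -- h's rank beaten later: h is filtered out
        rw [List.filter_cons_of_neg (by simp [ne_of_gt hlt2]), if_pos hlt2]
        simp
      · -- h attains the minimum: h leads the filtered list
        rw [List.filter_cons_of_pos (by simp [heq]), if_neg (by omega)]
        simp
    · -- rank not better: best unchanged
      have hmin : min b (pvRank h) = b := min_eq_left (le_of_not_gt hlt)
      have hle : (t.map pvRank).foldl min b ≤ b := pv_foldl_min_le _ _
      by_cases heq : pvRank h = b
      · have hstep : pvStep (some b, acc) h = (some b, acc ++ [h]) := by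
          simp [pvStep, heq]
        rw [List.foldl_cons, hstep, ih, hm, hmin]
        rcases lt_or_eq_of_le hle with hlt2 | heq2
        · rw [List.filter_cons_of_neg (by simp [heq]; omega), if_pos hlt2, if_pos hlt2]
        · rw [List.filter_cons_of_pos (by simp [heq, heq2]), if_neg (by omega), if_neg (by omega)]
          simp
      · have hstep : pvStep (some b, acc) h = (some b, acc) := by
          simp [pvStep, hlt, heq]
        rw [List.foldl_cons, hstep, ih, hm, hmin]
        have hne : ¬ pvRank h = (t.map pvRank).foldl min b := by
          intro hc
          rcases lt_or_eq_of_le hle with hlt2 | heq2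
          · omega
          · rw [heq2] at hc; exact heq hc
        rw [List.filter_cons_of_neg (by simp [hne])]

-- ===== VERDICT (by name: the statement is the Claim_ definition above) =====
theorem select_by_pfd_country_issue_spec : Claim_equal_select_by_pfd_country_issue := by
  intro results country_exch_order _hdom hpre
  unfold Spec_select_by_pfd_country_issue
  match results with
  | [] => exact absurd rfl hpre
  | h :: t =>
    unfold select_by_pfd_country_issue select_by_pfd_country_issue_alt
    have hmin : PySem.List.min? ((h :: t).map pvRank) (fun x => x)
        = some ((t.map pvRank).foldl min (pvRank h)) := by
      rw [List.map_cons]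
      exact PySem.List.min?_id_cons _ _
    rw [hmin]
    have hfold : (h :: t).foldl pvStep (none, []) = t.foldl pvStep (some (pvRank h), [h]) := by
      simp [pvStep]
    rw [hfold, pv_fold_invariant]
    dsimp only
    have hle : (t.map pvRank).foldl min (pvRank h) ≤ pvRank h := pv_foldl_min_le _ _
    rcases lt_or_eq_of_le hle with hlt | heq
    · -- the minimum beats h's rank: h is filtered out, and the minimum is attained in t
      have hmem' : (t.map pvRank).foldl min (pvRank h) ∈ t.map pvRank := by
        have hmem := PySem.List.min?_mem hmin
        rw [List.map_cons] at hmem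
        rcases List.mem_cons.1 hmem with h1 | h2
        · exact absurd h1 (by omega)
        · exact h2
      rcases List.mem_map.1 hmem' with ⟨x, hx, hxr⟩
      have hne : t.filter (fun y => decide (pvRank y = (t.map pvRank).foldl min (pvRank h))) ≠ [] := by
        intro hnil
        have hx' : x ∈ t.filter (fun y => decide (pvRank y = (t.map pvRank).foldl min (pvRank h))) :=
          List.mem_filter.2 ⟨hx, by simp [hxr]⟩
        rw [hnil] at hx'
        simp at hx'
      rw [List.filter_cons_of_neg (by simp only [decide_eq_true_eq]; omega)]
      simp only [if_pos hlt, List.nil_append]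
      rw [if_neg (by simpa [List.isEmpty_iff] using hne)]
    · -- h itself attains the minimum: the hit lists start with h on both sides
      rw [List.filter_cons_of_pos (by simp only [decide_eq_true_eq]; omega)]
      rw [if_neg (by simp), if_neg (by omega)]
      simp
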